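-- pv_equiv track=rewrite | github.com/mayasabb/first-repository | week 3/6.9.22/FunctionsForSchedules.py | building_schedule
-- ===== SOURCE A (Python) =====
-- def building_schedule(hours_per_day ,amount_of_days, schedule, DAY_LIST):
--     list = []
--     for row in range(hours_per_day + 1):
--         for col in range(amount_of_days):
--             if row == 0:
--                 list.append(DAY_LIST[col])
--             else:
--                 list.append("free")
--         schedule.append(list)
--         list = []
--
--     return schedule
-- ===== SOURCE B (Python) =====
-- def building_schedule(hours_per_day, amount_of_days, schedule, DAY_LIST):
--     # Build the grid column by column (each column: its day name on top of the
--     # free hours), then emit it row-major onto schedule.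
--     columns = [[DAY_LIST[col]] + ["free"] * hours_per_day
--                for col in range(amount_of_days)]
--     for row in range(hours_per_day + 1):
--         schedule.append([column[row] for column in columns])
--     return schedule
-- ===== Notes on version B (the rewrite author's own statement) =====
-- stated objective: alternative
-- what changed: Builds the grid column-major (one column per day: the day name on top of the free hours) and then emits it row-major by transposition, instead of A's row-major nested loop with a per-cell row==0 branch; Pre_ excludes amount_of_days > len(DAY_LIST), where A raises IndexError whenever it builds a header and where B always indexes DAY_LIST.
-- outside the precondition, e.g. on building_schedule(-1, 3, [], ['Mon']): A returns [], B raises IndexError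
import Mathlib
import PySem

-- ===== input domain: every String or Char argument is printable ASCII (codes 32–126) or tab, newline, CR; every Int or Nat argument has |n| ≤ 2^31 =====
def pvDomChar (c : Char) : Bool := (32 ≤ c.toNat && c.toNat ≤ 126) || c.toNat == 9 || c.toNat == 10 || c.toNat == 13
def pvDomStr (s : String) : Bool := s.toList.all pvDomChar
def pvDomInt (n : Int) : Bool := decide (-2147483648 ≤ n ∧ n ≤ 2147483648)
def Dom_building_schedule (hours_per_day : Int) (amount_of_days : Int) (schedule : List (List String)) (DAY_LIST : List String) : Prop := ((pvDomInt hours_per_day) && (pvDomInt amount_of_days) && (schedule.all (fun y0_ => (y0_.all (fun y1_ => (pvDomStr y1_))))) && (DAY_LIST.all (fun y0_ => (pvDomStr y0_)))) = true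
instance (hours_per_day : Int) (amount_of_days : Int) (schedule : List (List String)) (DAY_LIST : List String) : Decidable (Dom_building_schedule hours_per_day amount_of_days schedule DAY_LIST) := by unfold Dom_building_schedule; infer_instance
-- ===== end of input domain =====

-- B builds the grid column by column (each column = its day name on top of the free hours)
-- and emits it row-major by transposition, instead of A's row-major nested loop with a
-- per-cell row==0 branch. Both Pythons mutate `schedule` in place identically; the
-- equivalence proved is about the return value.

-- ===== PORT A =====
def building_schedule (hours_per_day : Int) (amount_of_days : Int) (schedule : List (List String)) (DAY_LIST : List String) : List (List String) :=
  (PySem.List.pyRange 0 (hours_per_day + 1) 1).foldl (fun sched row =>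
    sched ++ [(PySem.List.pyRange 0 amount_of_days 1).foldl (fun lst col =>
      if row == 0 then lst ++ [PySem.List.pyGetD DAY_LIST col ""]
      else lst ++ ["free"]) []]) schedule

-- ===== PORT B =====
-- Python's ["free"] * hours_per_day is List.replicate hours_per_day.toNat "free":
-- exact, since list repetition by a non-positive count is the empty list.
def building_schedule_alt (hours_per_day : Int) (amount_of_days : Int) (schedule : List (List String)) (DAY_LIST : List String) : List (List String) :=
  let columns := (PySem.List.pyRange 0 amount_of_days 1).map
    (fun col => [PySem.List.pyGetD DAY_LIST col ""] ++ List.replicate hours_per_day.toNat "free")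
  (PySem.List.pyRange 0 (hours_per_day + 1) 1).foldl (fun sched row =>
    sched ++ [columns.map (fun column => PySem.List.pyGetD column row "")]) schedule

-- ===== PRECONDITION & SPEC =====
-- Pre_ excludes amount_of_days > len(DAY_LIST): there Python A raises IndexError whenever it
-- builds a header row (hours_per_day ≥ 0), and when hours_per_day < 0 A returns schedule
-- unchanged while B, which always indexes DAY_LIST while building its columns, raises.
def Pre_building_schedule (hours_per_day : Int) (amount_of_days : Int) (schedule : List (List String)) (DAY_LIST : List String) : Prop :=
  amount_of_days ≤ (DAY_LIST.length : Int)
instance (hours_per_day : Int) (amount_of_days : Int) (schedule : List (List String)) (DAY_LIST : List String) : Decidable (Pre_building_schedule hours_per_day amount_of_days schedule DAY_LIST) := by unfold Pre_building_schedule; infer_instance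

def pvWitness_building_schedule : Int × Int × List (List String) × List String := (2, 3, [], ["Mon", "Tue", "Wed"])

def Spec_building_schedule (hours_per_day : Int) (amount_of_days : Int) (schedule : List (List String)) (DAY_LIST : List String) (out : List (List String)) : Prop := out = building_schedule_alt hours_per_day amount_of_days schedule DAY_LIST
instance (hours_per_day : Int) (amount_of_days : Int) (schedule : List (List String)) (DAY_LIST : List String) (out : List (List String)) : Decidable (Spec_building_schedule hours_per_day amount_of_days schedule DAY_LIST out) := by unfold Spec_building_schedule; infer_instance

-- ===== CLAIM (what is proved, stated in full; the proofs are below) =====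
def Claim_equal_building_schedule : Prop := ∀ (hours_per_day : Int) (amount_of_days : Int) (schedule : List (List String)) (DAY_LIST : List String), Dom_building_schedule hours_per_day amount_of_days schedule DAY_LIST → Pre_building_schedule hours_per_day amount_of_days schedule DAY_LIST → Spec_building_schedule hours_per_day amount_of_days schedule DAY_LIST (building_schedule hours_per_day amount_of_days schedule DAY_LIST)

-- ===== LEMMAS AND PROOFS =====

-- indexing one of B's columns at a row 1 ≤ row ≤ h picks a "free" cell
theorem pyGetD_col_free (x : String) (h row : Int) (h1 : 1 ≤ row) (h2 : row ≤ h) :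
    PySem.List.pyGetD ([x] ++ List.replicate h.toNat "free") row "" = "free" := by
  have hlen : (([x] ++ List.replicate h.toNat "free").length : Int) = 1 + h.toNat := by
    simp; omega
  rw [PySem.List.pyGetD_eq_getElem _ _ (by omega) (by rw [hlen]; omega)]
  have hk : ∃ k : Nat, row.toNat = k + 1 ∧ k < h.toNat := by
    refine ⟨row.toNat - 1, by omega, by omega⟩
  obtain ⟨k, hk1, hk2⟩ := hk
  simp only [List.singleton_append, hk1, List.getElem_cons_succ]
  exact List.getElem_replicate _

-- ===== VERDICT (by name: the statement is the Claim_ definition above) =====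
theorem building_schedule_spec : Claim_equal_building_schedule := by
  intro h a sched DL _ _
  unfold Spec_building_schedule building_schedule building_schedule_alt
  simp only [PySem.List.foldl_append_singleton_eq_map]
  congr 1
  apply List.map_congr_left
  intro row hrow
  obtain ⟨hr0, hrlt⟩ := (PySem.List.mem_pyRange_one).1 hrow
  by_cases hz : row = 0
  · subst hz
    simp only [beq_self_eq_true, if_true, List.map_map]
    rw [PySem.List.foldl_append_singleton_eq_map, List.nil_append]
    apply List.map_congr_left
    intro col _
    simp [PySem.List.pyGetD_zero_cons]
  · have hne : (row == 0) = false := by simp [hz]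
    simp only [hne, Bool.false_eq_true, if_false, List.map_map]
    rw [PySem.List.foldl_append_singleton_eq_map, List.nil_append]
    apply List.map_congr_left
    intro col _
    simp only [Function.comp]
    exact (pyGetD_col_free _ h row (by omega) (by omega)).symm
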